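-- pv_equiv track=rewrite | github.com/pexley-math/oeis-A395434 | code/verify_method1.py | enumerate_fixed_polyhexes
-- ===== SOURCE A (Python) =====
-- _HEX_DIRS = [(1, 0), (1, -1), (0, -1), (-1, 0), (-1, 1), (0, 1)]
--
-- def _hex_neighbours(cell):
--     q, r = cell
--     return [(q + dq, r + dr) for dq, dr in _HEX_DIRS]
--
-- def _normalise(cells):
--     """Canonical form under translation only: shift min-q to 0, and among
--     cells with minimum q shift min-r to 0.
--     """
--     mq = min(q for q, _ in cells)
--     mr = min(r for q, r in cells if q == mq)
--     return frozenset((q - mq, r - mr) for q, r in cells)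
--
-- def enumerate_fixed_polyhexes(n):
--     """Enumerate all fixed n-cell polyhexes via pure-Python BFS growth.
--     Fixed = distinct up to translation only. No rotation, no reflection.
--     Independent of polyform_enum.
--     """
--     if n <= 0:
--         return [frozenset()]
--     if n == 1:
--         return [frozenset({(0, 0)})]
--     prev = enumerate_fixed_polyhexes(n - 1)
--     seen = set()
--     out = []
--     for p in prev:
--         for cell in p:
--             for nb in _hex_neighbours(cell):
--                 if nb in p:
--                     continue
--                 grown = _normalise(p | {nb})
--                 if grown not in seen:
--                     seen.add(grown)
--                     out.append(grown)
--     return out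
-- ===== SOURCE B (Python) =====
-- _HEX_DIRS = [(1, 0), (1, -1), (0, -1), (-1, 0), (-1, 1), (0, 1)]
--
-- def _hex_neighbours(cell):
--     q, r = cell
--     return [(q + dq, r + dr) for dq, dr in _HEX_DIRS]
--
-- def _normalise(cells):
--     mq = min(q for q, _ in cells)
--     mr = min(r for q, r in cells if q == mq)
--     return frozenset((q - mq, r - mr) for q, r in cells)
--
-- def enumerate_fixed_polyhexes(n):
--     """Bottom-up iterative build: grow level by level from the single hex,
--     deduplicating each level with dict.fromkeys over a generator expression."""
--     if n <= 0:
--         return [frozenset()]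
--     current = [frozenset({(0, 0)})]
--     for _ in range(n - 1):
--         current = list(dict.fromkeys(
--             _normalise(p | {nb})
--             for p in current
--             for cell in p
--             for nb in _hex_neighbours(cell)
--             if nb not in p))
--     return current
-- ===== Notes on version B (the rewrite author's own statement) =====
-- stated objective: idiomatic
-- what changed: Recursion on n replaced by a bottom-up iterative loop, and the explicit nested loops with a manual seen-set/out-list replaced by a single generator expression deduplicated with dict.fromkeys (first occurrence kept).
import Mathlib
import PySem

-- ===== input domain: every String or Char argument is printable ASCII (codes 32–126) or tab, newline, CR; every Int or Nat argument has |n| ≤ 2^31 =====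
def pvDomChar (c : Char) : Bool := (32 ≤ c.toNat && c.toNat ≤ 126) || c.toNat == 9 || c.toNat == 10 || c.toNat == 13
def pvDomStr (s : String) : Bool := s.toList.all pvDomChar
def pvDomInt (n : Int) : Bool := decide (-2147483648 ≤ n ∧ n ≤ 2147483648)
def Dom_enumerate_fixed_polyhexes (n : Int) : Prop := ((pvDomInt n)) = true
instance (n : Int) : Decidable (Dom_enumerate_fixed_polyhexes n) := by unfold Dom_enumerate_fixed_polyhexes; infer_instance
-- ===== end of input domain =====

-- B: bottom-up iterative build with comprehension+first-occurrence dedup instead of A's recursion with manual seen/out loops; same values, same cost.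


-- ===== PORT A =====
-- a frozenset of cells is a PySem.Set (Int × Int); the output list of frozensets is List (List (Int × Int))
def pvHexDirs : List (Int × Int) := [(1, 0), (1, -1), (0, -1), (-1, 0), (-1, 1), (0, 1)]

def pvHexNeighbours (cell : Int × Int) : List (Int × Int) :=
  pvHexDirs.map (fun d => (cell.1 + d.1, cell.2 + d.2))

-- _normalise; min(...) via PySem.List.min? (cells is always nonempty where called, .getD 0 unreachable)
def pvNormalise (cells : List (Int × Int)) : List (Int × Int) :=
  let mq := (PySem.List.min? (cells.map Prod.fst) (fun x => x)).getD 0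
  let mr := (PySem.List.min? ((cells.filter (fun c => c.1 == mq)).map Prod.snd) (fun x => x)).getD 0
  PySem.Set.ofList (cells.map (fun c => (c.1 - mq, c.2 - mr)))

-- the body of A's innermost loop with its seen/out pair of accumulators ('grown in seen' is frozenset equality = PySem.Set.equal)
def pvPairStep (p : List (Int × Int)) (st : List (List (Int × Int)) × List (List (Int × Int)))
    (nb : Int × Int) : List (List (Int × Int)) × List (List (Int × Int)) :=
  if nb ∈ p then st
  else
    let grown := pvNormalise (PySem.Set.add p nb)
    if st.1.any (fun s => PySem.Set.equal s grown) then st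
    else (st.1 ++ [grown], st.2 ++ [grown])

def pvGrowA (prev : List (List (Int × Int))) : List (List (Int × Int)) :=
  (prev.foldl (fun st p =>
    p.foldl (fun st cell => (pvHexNeighbours cell).foldl (pvPairStep p) st) st)
    (([] : List (List (Int × Int))), ([] : List (List (Int × Int))))).2

def enumerate_fixed_polyhexes (n : Int) : List (List (Int × Int)) :=
  if n ≤ 0 then [[]]
  else if n = 1 then [[(0, 0)]]
  else pvGrowA (enumerate_fixed_polyhexes (n - 1))
termination_by n.toNat
decreasing_by omega

-- ===== PORT B =====
-- the generator expression of Source B, flattened in the same order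
def pvCandidates (cur : List (List (Int × Int))) : List (List (Int × Int)) :=
  cur.flatMap (fun p =>
    p.flatMap (fun cell =>
      (pvHexNeighbours cell).filterMap (fun nb =>
        if nb ∈ p then none else some (pvNormalise (PySem.Set.add p nb)))))

-- list(dict.fromkeys(...)) over frozenset keys: keep first occurrence under set equality
def pvDedupStep (acc : List (List (Int × Int))) (g : List (Int × Int)) : List (List (Int × Int)) :=
  if acc.any (fun s => PySem.Set.equal s g) then acc else acc ++ [g]

def pvDedupSets (xs : List (List (Int × Int))) : List (List (Int × Int)) :=
  xs.foldl pvDedupStep []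

-- 'for _ in range(n-1): current = ...'
def pvIter : Nat → List (List (Int × Int)) → List (List (Int × Int))
  | 0, cur => cur
  | k + 1, cur => pvIter k (pvDedupSets (pvCandidates cur))

def enumerate_fixed_polyhexes_alt (n : Int) : List (List (Int × Int)) :=
  if n ≤ 0 then [[]]
  else pvIter (n - 1).toNat [[(0, 0)]]

-- ===== PRECONDITION & SPEC =====
-- Pre_ excludes large n, on which Python A's recursion of depth n exceeds CPython's recursion limit and raises RecursionError (n ≤ 900 stays safely below the default limit of 1000).
def Pre_enumerate_fixed_polyhexes (n : Int) : Prop := n ≤ 900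
instance (n : Int) : Decidable (Pre_enumerate_fixed_polyhexes n) := by unfold Pre_enumerate_fixed_polyhexes; infer_instance
def pvWitness_enumerate_fixed_polyhexes : Int := 3

def Spec_enumerate_fixed_polyhexes (n : Int) (out : List (List (Int × Int))) : Prop := out = enumerate_fixed_polyhexes_alt n
instance (n : Int) (out : List (List (Int × Int))) : Decidable (Spec_enumerate_fixed_polyhexes n out) := by unfold Spec_enumerate_fixed_polyhexes; infer_instance

-- ===== CLAIM (what is proved, stated in full; the proofs are below) =====
def Claim_equal_enumerate_fixed_polyhexes : Prop := ∀ (n : Int), Dom_enumerate_fixed_polyhexes n → Pre_enumerate_fixed_polyhexes n → Spec_enumerate_fixed_polyhexes n (enumerate_fixed_polyhexes n)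

-- ===== LEMMAS AND PROOFS =====

-- a foldl over a filterMap is the foldl that skips the 'none' elements
theorem pv_foldl_filterMap {α β γ : Type} (l : List α) (f : α → Option β) (g : γ → β → γ) (init : γ) :
    (l.filterMap f).foldl g init
      = l.foldl (fun st x => match f x with | some b => g st b | none => st) init := by
  induction l generalizing init with
  | nil => rfl
  | cons x t ih =>
    cases h : f x <;> simp [h, ih]

-- a foldl over a flatMap is the nested foldl
theorem pv_foldl_flatMap {α β γ : Type} (l : List α) (g : α → List β) (f : γ → β → γ) (init : γ) :
    (l.flatMap g).foldl f init = l.foldl (fun st x => (g x).foldl f st) init := by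
  induction l generalizing init with
  | nil => rfl
  | cons x t ih => simp [List.flatMap_cons, List.foldl_append, ih]

-- the pair-state step on both components at once
def pvStep2 (st : List (List (Int × Int)) × List (List (Int × Int))) (g : List (Int × Int)) :
    List (List (Int × Int)) × List (List (Int × Int)) :=
  if st.1.any (fun s => PySem.Set.equal s g) then st else (st.1 ++ [g], st.2 ++ [g])

-- the innermost neighbour loop is the pair fold over the filterMapped candidates
theorem pv_nb_fold (p : List (Int × Int)) (cell : Int × Int)
    (st : List (List (Int × Int)) × List (List (Int × Int))) :
    (pvHexNeighbours cell).foldl (pvPairStep p) st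
      = ((pvHexNeighbours cell).filterMap (fun nb =>
          if nb ∈ p then none else some (pvNormalise (PySem.Set.add p nb)))).foldl pvStep2 st := by
  rw [pv_foldl_filterMap]
  apply PySem.List.foldl_congr_mem
  intro acc nb _
  by_cases h : nb ∈ p
  · simp [pvPairStep, h]
  · have hadd : PySem.Set.add p nb = p ++ [nb] := by simp [PySem.Set.add, h]
    simp only [pvPairStep, pvStep2, hadd]
    simp [h]

-- A's whole double inner loop over one polyhex
theorem pv_p_fold (p : List (Int × Int)) (st : List (List (Int × Int)) × List (List (Int × Int))) :
    p.foldl (fun st cell => (pvHexNeighbours cell).foldl (pvPairStep p) st) st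
      = (p.flatMap (fun cell => (pvHexNeighbours cell).filterMap (fun nb =>
          if nb ∈ p then none else some (pvNormalise (PySem.Set.add p nb))))).foldl pvStep2 st := by
  rw [pv_foldl_flatMap]
  apply PySem.List.foldl_congr_mem
  intro acc cell _
  exact pv_nb_fold p cell acc

-- A's pair accumulator (seen, out) stays diagonal: both components are the dedup fold
theorem pv_pair_fold (xs : List (List (Int × Int))) (s : List (List (Int × Int))) :
    xs.foldl pvStep2 (s, s) = (xs.foldl pvDedupStep s, xs.foldl pvDedupStep s) := by
  induction xs generalizing s with
  | nil => rfl
  | cons x t ih =>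
    simp only [List.foldl_cons, pvStep2, pvDedupStep]
    by_cases h : (s.any (fun u => PySem.Set.equal u x)) = true <;> simp [h, ih]

-- A's whole growth step equals B's: dedup of the flattened candidate list
theorem pv_growA_eq (prev : List (List (Int × Int))) :
    pvGrowA prev = pvDedupSets (pvCandidates prev) := by
  unfold pvGrowA pvCandidates pvDedupSets
  have h : prev.foldl
      (fun st p => p.foldl (fun st cell => (pvHexNeighbours cell).foldl (pvPairStep p) st) st)
      (([] : List (List (Int × Int))), ([] : List (List (Int × Int))))
    = prev.foldl (fun st p => (p.flatMap (fun cell => (pvHexNeighbours cell).filterMap (fun nb =>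
          if nb ∈ p then none else some (pvNormalise (PySem.Set.add p nb))))).foldl pvStep2 st)
      (([] : List (List (Int × Int))), ([] : List (List (Int × Int)))) := by
    apply PySem.List.foldl_congr_mem
    intro acc p _
    exact pv_p_fold p acc
  rw [h, ← pv_foldl_flatMap, pv_pair_fold]

-- pvIter commutes with one growth step
theorem pv_iter_comm (k : Nat) (cur : List (List (Int × Int))) :
    pvIter (k + 1) cur = pvDedupSets (pvCandidates (pvIter k cur)) := by
  induction k generalizing cur with
  | zero => rfl
  | succ k ih => exact ih (pvDedupSets (pvCandidates cur))

-- A at n = k+1 is the k-fold iteration from the single hex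
theorem pv_main (k : Nat) :
    enumerate_fixed_polyhexes ((k : Int) + 1) = pvIter k [[(0, 0)]] := by
  induction k with
  | zero => simp [enumerate_fixed_polyhexes, pvIter]
  | succ k ih =>
    rw [enumerate_fixed_polyhexes]
    push_cast
    have h0 : ¬ ((k : Int) + 1 + 1 ≤ 0) := by omega
    have h1 : ((k : Int) + 1 + 1) ≠ 1 := by omega
    have h2 : ((k : Int) + 1 + 1) - 1 = (k : Int) + 1 := by ring
    rw [if_neg h0, if_neg h1, h2, ih, pv_growA_eq, ← pv_iter_comm]

-- ===== VERDICT (by name: the statement is the Claim_ definition above) =====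
theorem enumerate_fixed_polyhexes_spec : Claim_equal_enumerate_fixed_polyhexes := by
  intro n _ _
  unfold Spec_enumerate_fixed_polyhexes enumerate_fixed_polyhexes_alt
  by_cases h : n ≤ 0
  · rw [if_pos h, enumerate_fixed_polyhexes, if_pos h]
  · rw [if_neg h]
    have hk : n = ((n - 1).toNat : Int) + 1 := by omega
    conv_lhs => rw [hk]
    exact pv_main _
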